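-- pv_equiv track=rewrite | github.com/Rajasekhar1131997/TIP102_Sessions | Week2Session2_SPSV1.py | num_equiv_species_pairs
-- ===== SOURCE A (Python) =====
-- from collections import Counter
--
-- def num_equiv_species_pairs(species_pairs):
--     normalized = []
--     for a, b in species_pairs:
--         if a <= b:
--             normalized.append((a,b))
--         else:
--             normalized.append((b,a))
--     frequency = Counter(normalized)
--     total = 0
--     for freq in frequency.values():
--         if freq > 1:
--             total += (freq * (freq-1)) // 2
--     return total
-- ===== SOURCE B (Python) =====
-- def num_equiv_species_pairs(species_pairs):
--     seen = {}
--     total = 0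
--     for a, b in species_pairs:
--         key = (a, b) if a <= b else (b, a)
--         total += seen.get(key, 0)
--         seen[key] = seen.get(key, 0) + 1
--     return total
-- ===== Notes on version B (the rewrite author's own statement) =====
-- stated objective: alternative
-- what changed: Replaces the two-phase build-Counter-then-sum-freq*(freq-1)//2 structure by a single pass that, for each normalized pair, adds the running count of earlier equal pairs to the total.
import Mathlib
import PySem

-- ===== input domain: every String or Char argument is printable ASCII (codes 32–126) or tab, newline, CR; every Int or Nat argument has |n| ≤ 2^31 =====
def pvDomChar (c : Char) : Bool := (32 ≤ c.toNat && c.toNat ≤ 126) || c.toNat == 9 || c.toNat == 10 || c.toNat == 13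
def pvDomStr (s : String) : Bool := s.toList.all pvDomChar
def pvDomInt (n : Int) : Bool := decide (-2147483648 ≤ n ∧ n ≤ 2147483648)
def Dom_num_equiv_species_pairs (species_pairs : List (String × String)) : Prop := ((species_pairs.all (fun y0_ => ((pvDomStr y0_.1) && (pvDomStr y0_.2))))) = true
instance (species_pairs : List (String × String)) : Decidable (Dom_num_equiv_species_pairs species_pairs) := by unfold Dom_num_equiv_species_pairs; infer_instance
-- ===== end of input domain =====

-- B: a single accumulating pass with running counts replaces A's build-Counter-then-sum-C(f,2) two-phase structure (same cost, different decomposition).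


-- ===== PORT A =====
def num_equiv_species_pairs (species_pairs : List (String × String)) : Int :=
  let normalized : List (String × String) :=
    species_pairs.foldl (fun acc p =>
      if p.1 ≤ p.2 then acc ++ [(p.1, p.2)] else acc ++ [(p.2, p.1)]) []
  let frequency := PySem.Dict.counter normalized
  frequency.values.foldl (fun total freq =>
    if freq > 1 then total + PySem.Int.floordiv (freq * (freq - 1)) 2 else total) 0

-- ===== PORT B =====
def num_equiv_species_pairs_alt (species_pairs : List (String × String)) : Int :=
  (species_pairs.foldl (fun st p =>
      let key := if p.1 ≤ p.2 then (p.1, p.2) else (p.2, p.1)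
      (st.1.insert key (st.1.getD key 0 + 1), st.2 + st.1.getD key 0))
    ((PySem.Dict.empty : PySem.Dict (String × String) Int), (0 : Int))).2

-- ===== PRECONDITION & SPEC =====
def Spec_num_equiv_species_pairs (species_pairs : List (String × String)) (out : Int) : Prop := out = num_equiv_species_pairs_alt species_pairs
instance (species_pairs : List (String × String)) (out : Int) : Decidable (Spec_num_equiv_species_pairs species_pairs out) := by unfold Spec_num_equiv_species_pairs; infer_instance

-- ===== CLAIM (what is proved, stated in full; the proofs are below) =====
def Claim_equal_num_equiv_species_pairs : Prop := ∀ (species_pairs : List (String × String)), Dom_num_equiv_species_pairs species_pairs → Spec_num_equiv_species_pairs species_pairs (num_equiv_species_pairs species_pairs)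

-- ===== LEMMAS AND PROOFS =====

-- the min/max normalization both programs apply to a pair
def pvNorm (p : String × String) : String × String := if p.1 ≤ p.2 then (p.1, p.2) else (p.2, p.1)

-- C(m,2) as both programs compute it, as an Int
def pvC2 (m : Nat) : Int := ((m * (m - 1)) / 2 : Nat)

-- number of unordered equal pairs in a list, counted by first component
def pvN : List (String × String) → Int
  | [] => 0
  | k :: l => (l.count k : Int) + pvN l

lemma pvC2_succ (c : Nat) : pvC2 (c + 1) = pvC2 c + c := by
  unfold pvC2
  rcases c with _ | d
  · decide
  · have h : (d + 1 + 1) * (d + 1 + 1 - 1) = (d + 1) * (d + 1 - 1) + 2 * (d + 1) := by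
      simp only [Nat.add_sub_cancel]; ring
    rw [h, Nat.add_mul_div_left _ _ (by omega : 0 < 2)]
    push_cast; ring

lemma pvC2_cast (c : Nat) :
    (if (c : Int) > 1 then PySem.Int.floordiv ((c : Int) * ((c : Int) - 1)) 2 else 0) = pvC2 c := by
  rcases c with _ | _ | d
  · decide
  · decide
  · have hgt : ((d + 2 : Nat) : Int) > 1 := by push_cast; omega
    rw [if_pos hgt]
    have hc : ((d + 2 : Nat) : Int) * (((d + 2 : Nat) : Int) - 1) = (((d + 2) * (d + 1) : Nat) : Int) := by
      push_cast; ring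
    rw [hc, show (2 : Int) = ((2 : Nat) : Int) by norm_num,
      PySem.Int.floordiv_natCast]
    unfold pvC2
    norm_num [Nat.add_sub_cancel]
    congr 1

lemma pvN_append (l : List (String × String)) (k : String × String) :
    pvN (l ++ [k]) = pvN l + (l.count k : Int) := by
  induction l with
  | nil => simp [pvN]
  | cons a t ih =>
    simp only [List.cons_append, pvN, ih, List.count_cons, List.count_append]
    have : (k == a) = (a == k) := by
      by_cases h : a = k
      · subst h; simp
      · simp [beq_false_of_ne h, beq_false_of_ne (Ne.symm h)]
    rw [this]
    split <;> simp [List.count_nil] <;> ring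

lemma ofList_append_singleton (L : List (String × String)) (k : String × String) :
    PySem.Set.ofList (L ++ [k]) = PySem.Set.add (PySem.Set.ofList L) k := by
  rw [PySem.Set.ofList_eq_foldl, PySem.Set.ofList_eq_foldl, List.foldl_append]
  rfl

-- one-point update of a sum over a Nodup list
lemma sum_map_update_point (S : List (String × String)) (g g' : (String × String) → Int)
    (k : String × String) (hk : k ∈ S) (hnd : S.Nodup)
    (hoff : ∀ j ∈ S, j ≠ k → g' j = g j) :
    (S.map g').sum = (S.map g).sum + (g' k - g k) := by
  induction S with
  | nil => cases hk
  | cons a t ih =>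
    rcases List.mem_cons.mp hk with h | h
    · subst h
      have : t.map g' = t.map g := by
        apply List.map_congr_left
        intro j hj
        exact hoff j (List.mem_cons_of_mem _ hj) (fun he => (List.nodup_cons.mp hnd).1 (he ▸ hj))
      simp [this]; ring
    · have hne : a ≠ k := fun he => (List.nodup_cons.mp hnd).1 (he ▸ h)
      have := ih h (List.nodup_cons.mp hnd).2 (fun j hj => hoff j (List.mem_cons_of_mem _ hj))
      simp only [List.map_cons, List.sum_cons, this, hoff a (List.mem_cons_self) hne]
      ring

-- the Counter-sum of C(count,2) over the distinct keys equals pvN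
lemma sumC2_eq_pvN (L : List (String × String)) :
    ((PySem.Set.ofList L).map (fun k => pvC2 (L.count k))).sum = pvN L := by
  induction L using List.reverseRecOn with
  | nil => simp [pvN]
  | append_singleton l k ih =>
    rw [ofList_append_singleton, pvN_append]
    by_cases hmem : k ∈ l
    · have hkS : k ∈ PySem.Set.ofList l := (PySem.Set.mem_ofList _ _).mpr hmem
      have hadd : PySem.Set.add (PySem.Set.ofList l) k = PySem.Set.ofList l := by
        unfold PySem.Set.add
        simp [PySem.Set.contains, hkS]
      rw [hadd]
      rw [sum_map_update_point (PySem.Set.ofList l)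
            (fun j => pvC2 (l.count j)) (fun j => pvC2 ((l ++ [k]).count j)) k hkS
            (PySem.Set.nodup_ofList l)
            (by intro j _ hj; simp [List.count_append, Ne.symm hj])]
      rw [ih]
      have : (l ++ [k]).count k = l.count k + 1 := by simp [List.count_append]
      rw [this, pvC2_succ]
      ring
    · have hkS : k ∉ PySem.Set.ofList l := fun h => hmem ((PySem.Set.mem_ofList _ _).mp h)
      have hadd : PySem.Set.add (PySem.Set.ofList l) k = PySem.Set.ofList l ++ [k] := by
        unfold PySem.Set.add
        simp [PySem.Set.contains, hkS]
      rw [hadd, List.map_append, List.sum_append]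
      have h1 : (PySem.Set.ofList l).map (fun j => pvC2 ((l ++ [k]).count j))
              = (PySem.Set.ofList l).map (fun j => pvC2 (l.count j)) := by
        apply List.map_congr_left
        intro j hj
        have : j ≠ k := fun he => hkS (he ▸ hj)
        simp [List.count_append, Ne.symm this]
      have h2 : l.count k = 0 := List.count_eq_zero.mpr hmem
      rw [h1, ih]
      norm_num [List.count_append, h2, pvC2]

-- inserting at k shifts the getD-sum by the occurrences of k
lemma sum_map_getD_insert (l : List (String × String)) (d : PySem.Dict (String × String) Int)
    (k : String × String) (v : Int) :
    (l.map (fun j => (d.insert k v).getD j 0)).sum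
      = (l.map (fun j => d.getD j 0)).sum + (v - d.getD k 0) * (l.count k : Int) := by
  induction l with
  | nil => simp
  | cons a t ih =>
    simp only [List.map_cons, List.sum_cons, List.count_cons, ih]
    rw [PySem.Dict.getD_insert]
    by_cases h : a = k
    · subst h
      simp only [beq_self_eq_true, if_pos trivial]
      push_cast; ring
    · simp only [beq_iff_eq, if_neg h]
      push_cast; ring

-- loop invariant for B's single pass
lemma B_inv (l : List (String × String)) (d : PySem.Dict (String × String) Int) (t : Int) :
    (l.foldl (fun st k => (st.1.insert k (st.1.getD k 0 + 1), st.2 + st.1.getD k 0)) (d, t)).2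
      = t + pvN l + (l.map (fun j => d.getD j 0)).sum := by
  induction l generalizing d t with
  | nil => simp [pvN]
  | cons k l ih =>
    simp only [List.foldl_cons, pvN, List.map_cons, List.sum_cons]
    rw [ih, sum_map_getD_insert]
    ring

-- A's value is the C(count,2)-sum
lemma A_eq (sp : List (String × String)) :
    num_equiv_species_pairs sp
      = ((PySem.Set.ofList (sp.map pvNorm)).map (fun k => pvC2 ((sp.map pvNorm).count k))).sum := by
  unfold num_equiv_species_pairs
  have hnorm : sp.foldl (fun acc p =>
      if p.1 ≤ p.2 then acc ++ [(p.1, p.2)] else acc ++ [(p.2, p.1)]) []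
      = sp.map pvNorm := by
    have : sp.foldl (fun acc p =>
        if p.1 ≤ p.2 then acc ++ [(p.1, p.2)] else acc ++ [(p.2, p.1)]) []
        = sp.foldl (fun acc p => acc ++ [pvNorm p]) [] := by
      apply PySem.List.foldl_congr_mem
      intro acc p _
      unfold pvNorm
      split <;> rfl
    rw [this, PySem.List.foldl_append_singleton_eq_map]
    simp
  rw [hnorm]
  set L := sp.map pvNorm with hL
  show (PySem.Dict.counter L).values.foldl
      (fun total freq => if freq > 1 then total + PySem.Int.floordiv (freq * (freq - 1)) 2 else total) 0 = _
  have hvals : (PySem.Dict.counter L).values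
      = (PySem.Set.ofList L).map (fun k => (L.count k : Int)) := by
    show (PySem.Dict.counter L).items.map (·.2) = _
    rw [PySem.Dict.items_counter]
    simp
  rw [hvals]
  have : ((PySem.Set.ofList L).map (fun k => (L.count k : Int))).foldl
      (fun total freq => if freq > 1 then total + PySem.Int.floordiv (freq * (freq - 1)) 2 else total) 0
      = ((PySem.Set.ofList L).map (fun k => (L.count k : Int))).foldl
      (fun total freq => total + (if freq > 1 then PySem.Int.floordiv (freq * (freq - 1)) 2 else 0)) 0 := by
    apply PySem.List.foldl_congr_mem
    intro acc x _
    split <;> ring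
  rw [this, PySem.List.foldl_add]
  simp only [List.map_map, zero_add]
  apply congrArg
  apply List.map_congr_left
  intro k _
  exact pvC2_cast (L.count k)

-- B's value is pvN of the normalized list
lemma B_eq (sp : List (String × String)) :
    num_equiv_species_pairs_alt sp = pvN (sp.map pvNorm) := by
  unfold num_equiv_species_pairs_alt
  have : sp.foldl (fun st p =>
      let key := if p.1 ≤ p.2 then (p.1, p.2) else (p.2, p.1)
      (st.1.insert key (st.1.getD key 0 + 1), st.2 + st.1.getD key 0))
      ((PySem.Dict.empty : PySem.Dict (String × String) Int), (0 : Int))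
      = (sp.map pvNorm).foldl
        (fun st k => (st.1.insert k (st.1.getD k 0 + 1), st.2 + st.1.getD k 0))
        ((PySem.Dict.empty : PySem.Dict (String × String) Int), (0 : Int)) := by
    rw [List.foldl_map]
    apply PySem.List.foldl_congr_mem
    intro acc p _
    unfold pvNorm
    rfl
  rw [this, B_inv]
  simp [PySem.Dict.getD_empty, Function.comp_def]

-- ===== VERDICT (by name: the statement is the Claim_ definition above) =====
theorem num_equiv_species_pairs_spec : Claim_equal_num_equiv_species_pairs := by
  intro sp _
  unfold Spec_num_equiv_species_pairs
  rw [A_eq, B_eq, sumC2_eq_pvN]
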